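-- pv_equiv track=rewrite | github.com/HamiGames/Lucid | 02-network-security/tunnels/entrypoint.py | parse_onion_ports
-- ===== SOURCE A (Python) =====
-- from typing import List, Tuple, Optional
--
-- def parse_onion_ports(spec: str) -> List[Tuple[int, str]]:
--     """
--     Accepts strings like "80 api-gateway:8080, 443 api-gateway:8443".
--     Returns list of (virtual_port, target_host:port).
--
--     Format: "VIRTUAL_PORT TARGET_HOST:PORT" pairs, comma or space separated.
--     Example: "80 api-gateway:8080" or "80 api-gateway:8080, 443 api-gateway:8443"
--     """
--     # Normalize separators: replace commas with spaces
--     tokens = spec.replace(",", " ").split()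
--
--     if not tokens:
--         return []
--
--     results = []
--     i = 0
--
--     while i < len(tokens):
--         # Check if current token is a digit (virtual port)
--         if tokens[i].isdigit():
--             virt_port = int(tokens[i])
--             # Next token should be HOST:PORT
--             if i + 1 < len(tokens) and ":" in tokens[i + 1]:
--                 target = tokens[i + 1]
--                 results.append((virt_port, target))
--                 i += 2
--             else:
--                 # Invalid format: digit not followed by HOST:PORT
--                 i += 1
--         elif ":" in tokens[i]:
--             # Standalone HOST:PORT without virtual port, default to 80
--             results.append((80, tokens[i]))
--             i += 1
--         else:
--             # Skip invalid tokens
--             i += 1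
--
--     return results
-- ===== SOURCE B (Python) =====
-- def parse_onion_ports(spec):
--     """Single forward pass carrying a pending virtual port instead of index lookahead."""
--     results = []
--     pending = None
--     for token in spec.replace(",", " ").split():
--         if token.isdigit():
--             pending = int(token)
--         elif ":" in token:
--             results.append((pending if pending is not None else 80, token))
--             pending = None
--         else:
--             pending = None
--     return results
-- ===== Notes on version B (the rewrite author's own statement) =====
-- stated objective: simpler
-- what changed: Replaces the index-based while loop with i+1 lookahead and i+=2/i+=1 stepping by a single for-loop over the tokens that carries the last seen virtual port in a variable, eliminating all index arithmetic.
import Mathlib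
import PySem

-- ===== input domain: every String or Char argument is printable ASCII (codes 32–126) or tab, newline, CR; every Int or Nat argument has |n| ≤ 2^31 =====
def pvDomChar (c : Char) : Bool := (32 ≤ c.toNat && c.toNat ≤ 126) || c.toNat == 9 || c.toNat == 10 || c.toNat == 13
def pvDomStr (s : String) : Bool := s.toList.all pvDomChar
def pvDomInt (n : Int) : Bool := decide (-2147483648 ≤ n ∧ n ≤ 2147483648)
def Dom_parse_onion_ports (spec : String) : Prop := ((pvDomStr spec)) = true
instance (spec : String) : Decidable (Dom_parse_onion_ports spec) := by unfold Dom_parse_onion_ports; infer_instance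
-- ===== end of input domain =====

-- B replaces A's index-based while loop with lookahead by a single forward pass
-- carrying the last seen virtual port in a variable; objective: simpler (no index arithmetic).

-- ===== PORT A =====
-- A's while loop over the token index, consuming one or two tokens per step,
-- transcribed as recursion on the remaining token list.
def pvA_go : List String → List (Int × String)
  | [] => []
  | t :: rest =>
    if PySem.Str.strIsdigit t then
      match rest with
      | next :: rest2 =>
        if PySem.Str.isIn ":" next then
          ((PySem.Int.ofStr? t).getD 0, next) :: pvA_go rest2   -- int(t): t.isdigit() guarantees success
        else pvA_go (next :: rest2)   -- i += 1: continue from the unconsumed lookahead token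
      | [] => []                      -- i += 1 past the last token: loop ends
    else if PySem.Str.isIn ":" t then (80, t) :: pvA_go rest
    else pvA_go rest

def parse_onion_ports (spec : String) : List (Int × String) :=
  let tokens := PySem.Str.split₀ (PySem.Str.replace spec "," " ")
  if tokens = [] then [] else pvA_go tokens

-- ===== PORT B =====
-- B's single forward pass with a pending virtual port.
def pvB_go (pending : Option Int) : List String → List (Int × String)
  | [] => []
  | t :: rest =>
    if PySem.Str.strIsdigit t then pvB_go (some ((PySem.Int.ofStr? t).getD 0)) rest
    else if PySem.Str.isIn ":" t then (pending.getD 80, t) :: pvB_go none rest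
    else pvB_go none rest

def parse_onion_ports_alt (spec : String) : List (Int × String) :=
  pvB_go none (PySem.Str.split₀ (PySem.Str.replace spec "," " "))

-- ===== PRECONDITION & SPEC =====
def Spec_parse_onion_ports (spec : String) (out : List (Int × String)) : Prop := out = parse_onion_ports_alt spec
instance (spec : String) (out : List (Int × String)) : Decidable (Spec_parse_onion_ports spec out) := by unfold Spec_parse_onion_ports; infer_instance

-- ===== CLAIM (what is proved, stated in full; the proofs are below) =====
def Claim_equal_parse_onion_ports : Prop := ∀ (spec : String), Dom_parse_onion_ports spec → Spec_parse_onion_ports spec (parse_onion_ports spec)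

-- ===== LEMMAS AND PROOFS =====

-- Invariant: A's loop from an arbitrary position equals B's loop with no pending port,
-- and A's loop started at a digit token equals B's loop with that port pending.
-- A token containing ':' is never an isdigit() token.
theorem pv_colon_not_digit (t : String) (h : PySem.Str.isIn ":" t = true) :
    PySem.Str.strIsdigit t = false := by
  rw [Bool.eq_false_iff]
  intro hd
  simp only [PySem.Str.isIn_eq] at h
  simp only [PySem.Str.strIsdigit_eq] at hd
  rw [show (":" : String).toList = [':'] from rfl, PySem.Chars.isIn_iff_infix] at h
  have hm : ':' ∈ t.toList := h.mem (by simp)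
  simp only [PySem.Chars.strIsdigit, Bool.and_eq_true, List.all_eq_true] at hd
  have := hd.2 _ hm
  simp [PySem.Chars.isdigit] at this

theorem pv_go_eq (ts : List String) :
    pvA_go ts = pvB_go none ts ∧
    ∀ d, PySem.Str.strIsdigit d = true →
      pvA_go (d :: ts) = pvB_go (some ((PySem.Int.ofStr? d).getD 0)) ts := by
  induction ts with
  | nil =>
    refine ⟨by simp only [pvA_go, pvB_go], fun d hd => ?_⟩
    rw [pvA_go.eq_def]
    simp_all [pvB_go]
  | cons t rest ih =>
    constructor
    · by_cases hd : PySem.Str.strIsdigit t = true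
      · rw [show pvB_go none (t :: rest) = pvB_go (some ((PySem.Int.ofStr? t).getD 0)) rest by
            simp only [pvB_go, hd, if_true]]
        exact ih.2 t hd
      · rw [pvA_go.eq_def]
        by_cases hc : PySem.Str.isIn ":" t = true <;> simp_all [pvB_go, ih.1]
    · intro d hd
      by_cases hc : PySem.Str.isIn ":" t = true
      · have ht := pv_colon_not_digit t hc
        rw [pvA_go.eq_def]
        simp_all [pvB_go, ih.1]
      · -- d's lookahead fails: A advances by one onto t; B keeps scanning, pending irrelevant
        have hA : pvA_go (d :: t :: rest) = pvA_go (t :: rest) := by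
          rw [pvA_go.eq_def]; simp_all
        rw [hA]
        by_cases ht : PySem.Str.strIsdigit t = true
        · rw [ih.2 t ht]
          simp_all [pvB_go]
        · rw [pvA_go.eq_def]
          simp_all [pvB_go, ih.1]

-- ===== VERDICT (by name: the statement is the Claim_ definition above) =====
theorem parse_onion_ports_spec : Claim_equal_parse_onion_ports := by
  intro spec _
  unfold Spec_parse_onion_ports parse_onion_ports parse_onion_ports_alt
  by_cases h : PySem.Str.split₀ (PySem.Str.replace spec "," " ") = []
  · simp only [h, if_true, pvB_go]
  · simp only [h, if_false]
    exact (pv_go_eq _).1
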